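-- pv_equiv track=rewrite | github.com/5kuuk/CTF-writeups | ductf-2023/safe-calculator/expcalc.py | get_sols
-- ===== SOURCE A (Python) =====
-- def get_sols(goal):
--     sols = {}
--     for g in goal:
--         for carry in range(1):
--             for a in alpha:
--                 for b in alpha:
--                     c = a + b + carry
--                     carry = c >> 8
--                     if c == g:
--                         if (g,carry) in sols.keys():
--                             sols[(g,carry)].append((a,b,c >> 8))
--                         else:
--                             sols[(g,carry)] = [(a,b,c >> 8)]
--     return sols
--
-- alpha = [ i for i in range(ord(' '),ord('~')+1)]
-- ===== SOURCE B (Python) =====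
-- # B: drop the inner b-scan: compute the complement b = g - a directly.
-- def get_sols(goal):
--     sols = {}
--     for g in goal:
--         for a in alpha:
--             b = g - a
--             if 32 <= b <= 126:
--                 sols.setdefault((g, 0), []).append((a, b, 0))
--     return sols
--
-- alpha = [i for i in range(ord(' '), ord('~') + 1)]
-- ===== Notes on version B (the rewrite author's own statement) =====
-- stated objective: faster
-- what changed: Replaced the nested alpha x alpha scan (with a threaded carry that is always 0) by a single pass over alpha computing the complement b = g - a and a range check, using dict.setdefault.
import Mathlib
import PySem

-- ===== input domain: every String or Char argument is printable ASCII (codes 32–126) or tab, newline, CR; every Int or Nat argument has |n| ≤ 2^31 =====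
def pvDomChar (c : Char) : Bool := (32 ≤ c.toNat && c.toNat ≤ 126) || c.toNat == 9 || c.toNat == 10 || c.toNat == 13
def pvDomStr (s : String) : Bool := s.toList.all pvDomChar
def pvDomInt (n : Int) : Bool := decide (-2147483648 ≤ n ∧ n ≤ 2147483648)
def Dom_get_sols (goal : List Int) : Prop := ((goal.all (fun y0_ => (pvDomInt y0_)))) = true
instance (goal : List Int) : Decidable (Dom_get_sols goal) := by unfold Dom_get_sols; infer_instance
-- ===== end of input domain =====

-- B replaces A's nested alpha×alpha scan (whose threaded carry is always 0) by a single
-- pass computing the complement b = g - a; measurably faster by the smaller inner work.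

-- alpha = [i for i in range(ord(' '), ord('~')+1)]
def alphaL : List Int := PySem.List.pyRange 32 127 1

-- ===== PORT A =====
-- body of A's innermost loop 'for b in alpha'; state = (sols, carry)
def aStep (g a : Int) (st : PySem.Dict (Int × Int) (List (Int × Int × Int)) × Int) (b : Int) :
    PySem.Dict (Int × Int) (List (Int × Int × Int)) × Int :=
  let sols := st.1
  let c := a + b + st.2
  let carry := PySem.Int.floordiv c 256
  if c = g then
    if sols.contains (g, carry) then
      (sols.modify (g, carry) [] (· ++ [(a, b, PySem.Int.floordiv c 256)]), carry)
    else
      (sols.insert (g, carry) [(a, b, PySem.Int.floordiv c 256)], carry)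
  else (sols, carry)

-- body of 'for a in alpha'
def aRow (g : Int) (st : PySem.Dict (Int × Int) (List (Int × Int × Int)) × Int) (a : Int) :
    PySem.Dict (Int × Int) (List (Int × Int × Int)) × Int :=
  alphaL.foldl (aStep g a) st

-- body of 'for g in goal' (the 'for carry in range(1)' loop included)
def aG (sols : PySem.Dict (Int × Int) (List (Int × Int × Int))) (g : Int) :
    PySem.Dict (Int × Int) (List (Int × Int × Int)) :=
  (PySem.List.pyRange 0 1 1).foldl (fun sols carry0 => (alphaL.foldl (aRow g) (sols, carry0)).1) sols

def get_sols (goal : List Int) : List (Int × Int × List (Int × Int × Int)) :=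
  (goal.foldl aG PySem.Dict.empty).items.map (fun p => (p.1.1, p.1.2, p.2))

-- ===== PORT B =====
-- body of 'for a in alpha': complement b = g - a, range check, setdefault-append
def bStep (g : Int) (sols : PySem.Dict (Int × Int) (List (Int × Int × Int))) (a : Int) :
    PySem.Dict (Int × Int) (List (Int × Int × Int)) :=
  let b := g - a
  if 32 ≤ b ∧ b ≤ 126 then
    (sols.setdefault (g, 0) []).modify (g, 0) [] (· ++ [(a, b, 0)])
  else sols

def bG (sols : PySem.Dict (Int × Int) (List (Int × Int × Int))) (g : Int) :
    PySem.Dict (Int × Int) (List (Int × Int × Int)) :=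
  alphaL.foldl (bStep g) sols

def get_sols_alt (goal : List Int) : List (Int × Int × List (Int × Int × Int)) :=
  (goal.foldl bG PySem.Dict.empty).items.map (fun p => (p.1.1, p.1.2, p.2))

-- ===== PRECONDITION & SPEC =====
def Spec_get_sols (goal : List Int) (out : List (Int × Int × List (Int × Int × Int))) : Prop := out = get_sols_alt goal
instance (goal : List Int) (out : List (Int × Int × List (Int × Int × Int))) : Decidable (Spec_get_sols goal out) := by unfold Spec_get_sols; infer_instance

-- ===== CLAIM (what is proved, stated in full; the proofs are below) =====
def Claim_equal_get_sols : Prop := ∀ (goal : List Int), Dom_get_sols goal → Spec_get_sols goal (get_sols goal)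

-- ===== LEMMAS AND PROOFS =====

-- the common update step both programs perform at a hit
def upd (g a : Int) (s : PySem.Dict (Int × Int) (List (Int × Int × Int))) :
    PySem.Dict (Int × Int) (List (Int × Int × Int)) :=
  if s.contains (g, 0) then s.modify (g, 0) [] (· ++ [(a, g - a, 0)])
  else s.insert (g, 0) [(a, g - a, 0)]

-- a fold that only acts on the (unique) element equal to t is a single conditional step
theorem fold_miss {σ : Type} (l : List Int) (t : Int) (f : σ → σ) (s : σ)
    (h : t ∉ l) : l.foldl (fun s b => if b = t then f s else s) s = s := by
  induction l generalizing s with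
  | nil => rfl
  | cons x xs ih =>
    simp only [List.mem_cons, not_or] at h
    simp [List.foldl_cons, Ne.symm h.1, ih _ h.2]

theorem fold_hit {σ : Type} (l : List Int) (hnd : l.Nodup) (t : Int) (f : σ → σ) (s : σ) :
    l.foldl (fun s b => if b = t then f s else s) s = if t ∈ l then f s else s := by
  induction l generalizing s with
  | nil => rfl
  | cons x xs ih =>
    simp only [List.nodup_cons] at hnd
    by_cases hx : x = t
    · subst hx
      simp [List.foldl_cons, fold_miss xs x f (f s) hnd.1]
    · simp [List.foldl_cons, hx, ih hnd.2, Ne.symm hx]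

-- individual step of A from carry 0, rewritten in 'fold_hit' shape
theorem aStep_eq (g a : Int) (ha : 32 ≤ a ∧ a ≤ 126)
    (st : PySem.Dict (Int × Int) (List (Int × Int × Int)) × Int)
    (b : Int) (hb : b ∈ alphaL) (h0 : st.2 = 0) :
    aStep g a st b = ((if b = g - a then upd g a st.1 else st.1), 0) := by
  have hbb : 32 ≤ b ∧ b ≤ 126 := by
    have := (PySem.List.mem_pyRange_one (a := 32) (b := 127) (x := b)).1 hb
    omega
  have hc0 : PySem.Int.floordiv (a + b + 0) 256 = 0 := by
    rw [PySem.Int.floordiv_eq_ediv_of_pos (by norm_num)]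
    exact Int.ediv_eq_zero_of_lt (by omega) (by omega)
  unfold aStep
  simp only [h0, hc0]
  by_cases hcg : a + b + 0 = g
  · have hb' : b = g - a := by omega
    rw [if_pos hcg, if_pos hb', hb']
    unfold upd
    split_ifs with h <;> rfl
  · have hb' : b ≠ g - a := by omega
    rw [if_neg hcg, if_neg hb']

-- A's inner b-loop from carry 0: carry stays 0 and the scan collapses to one conditional step
theorem aRow_eq (g a : Int) (ha : 32 ≤ a ∧ a ≤ 126) (s : PySem.Dict (Int × Int) (List (Int × Int × Int))) :
    aRow g (s, 0) a = (if 32 ≤ g - a ∧ g - a ≤ 126 then upd g a s else s, 0) := by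
  have key : ∀ (l : List Int), (∀ b ∈ l, b ∈ alphaL) →
      ∀ (s : PySem.Dict (Int × Int) (List (Int × Int × Int))),
      l.foldl (aStep g a) (s, 0)
        = (l.foldl (fun s b => if b = g - a then upd g a s else s) s, 0) := by
    intro l
    induction l with
    | nil => intro _ s; rfl
    | cons x xs ih =>
      intro hmem s
      rw [List.foldl_cons, aStep_eq g a ha (s, 0) x (hmem x List.mem_cons_self) rfl,
        ih (fun b hb => hmem b (List.mem_cons_of_mem _ hb)), List.foldl_cons]
  rw [aRow, key alphaL (fun _ hb => hb) s,
    fold_hit alphaL (by rw [alphaL]; exact PySem.List.nodup_pyRange_one 32 127) (g - a) (upd g a) s]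
  have hmem : (g - a) ∈ alphaL ↔ (32 ≤ g - a ∧ g - a ≤ 126) := by
    rw [alphaL, PySem.List.mem_pyRange_one]; omega
  simp [hmem]

-- B's step equals the common update step
theorem bStep_eq (g a : Int) (s : PySem.Dict (Int × Int) (List (Int × Int × Int))) :
    bStep g s a = if 32 ≤ g - a ∧ g - a ≤ 126 then upd g a s else s := by
  unfold bStep
  by_cases h : 32 ≤ g - a ∧ g - a ≤ 126
  · rw [if_pos h, if_pos h]
    unfold upd
    by_cases hc : s.contains (g, 0)
    · rw [PySem.Dict.setdefault_of_contains _ _ hc, if_pos hc]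
    · rw [PySem.Dict.setdefault_of_not_contains _ _ (by simpa using hc), if_neg hc]
      show ((s.insert (g, 0) []).insert (g, 0) _) = _
      rw [PySem.Dict.insert_insert_self, PySem.Dict.getD_insert_self]
      rfl
  · rw [if_neg h, if_neg h]

-- per-g bodies of A and B coincide
theorem body_eq (s : PySem.Dict (Int × Int) (List (Int × Int × Int))) (g : Int) :
    aG s g = bG s g := by
  have range01 : PySem.List.pyRange 0 1 1 = [0] := by decide
  rw [aG, bG, range01, List.foldl_cons, List.foldl_nil]
  have key : ∀ (l : List Int), (∀ a ∈ l, 32 ≤ a ∧ a ≤ 126) →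
      ∀ (s : PySem.Dict (Int × Int) (List (Int × Int × Int))),
      l.foldl (aRow g) (s, (0 : Int)) = (l.foldl (bStep g) s, 0) := by
    intro l
    induction l with
    | nil => intro _ s; rfl
    | cons x xs ih =>
      intro hmem s
      rw [List.foldl_cons, aRow_eq g x (hmem x List.mem_cons_self) s, List.foldl_cons,
        ih (fun a ha => hmem a (List.mem_cons_of_mem _ ha)), bStep_eq g x s]
  rw [key alphaL (fun a ha => by
    have := (PySem.List.mem_pyRange_one (a := 32) (b := 127) (x := a)).1 ha; omega) s]

-- ===== VERDICT (by name: the statement is the Claim_ definition above) =====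
theorem get_sols_spec : Claim_equal_get_sols := by
  intro goal _
  unfold Spec_get_sols get_sols get_sols_alt
  rw [show aG = bG from funext fun s => funext fun g => body_eq s g]
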